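-- pv_equiv track=rewrite | github.com/a-h-b/binny | workflow/scripts/binny_functions.py | shorten_cluster_names
-- ===== SOURCE A (Python) =====
-- def shorten_cluster_names(cluster):
--     new_name = []
--     sub_clusters = cluster.split('.')
--     previous_sub_clstr = None
--     for index, sub_clstr in enumerate(sub_clusters):
--         if sub_clstr == previous_sub_clstr:
--             continue
--         previous_sub_clstr = sub_clstr
--         counter = 0
--         while index+counter+1 <= len(sub_clusters)-1 and sub_clstr == sub_clusters[index+counter+1]:
--             counter += 1
--         if counter > 0:
--             new_name.append(sub_clstr+'x'+str(counter+1))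
--         else:
--             new_name.append(sub_clstr)
--     new_name = '.'.join(new_name)
--     return new_name
-- ===== SOURCE B (Python) =====
-- def shorten_cluster_names(cluster):
--     def rle(parts):
--         if not parts:
--             return []
--         tok = parts[0]
--         k = 1
--         while k < len(parts) and parts[k] == tok:
--             k += 1
--         head = tok if k == 1 else tok + 'x' + str(k)
--         return [head] + rle(parts[k:])
--     return '.'.join(rle(cluster.split('.')))
-- ===== Notes on version B (the rewrite author's own statement) =====
-- stated objective: simpler
-- what changed: Replaced A's enumerate loop with a previous-token skip flag and an absolute-index look-ahead while loop by a run-consuming recursion: each call measures the leading run of the remaining token list, emits its compressed name, and recurses on the rest.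
import Mathlib
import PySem

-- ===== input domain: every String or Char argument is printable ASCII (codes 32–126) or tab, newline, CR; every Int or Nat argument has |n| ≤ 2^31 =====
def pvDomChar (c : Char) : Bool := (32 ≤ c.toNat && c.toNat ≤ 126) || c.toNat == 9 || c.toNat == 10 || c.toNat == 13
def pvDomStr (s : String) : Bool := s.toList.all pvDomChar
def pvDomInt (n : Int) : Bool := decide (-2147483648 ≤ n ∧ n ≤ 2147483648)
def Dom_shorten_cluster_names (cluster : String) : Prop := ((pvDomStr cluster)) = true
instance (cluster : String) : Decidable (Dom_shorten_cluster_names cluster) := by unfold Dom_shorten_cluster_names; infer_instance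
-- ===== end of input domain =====

-- B replaces A's skip-flag + absolute-index look-ahead loop by a run-consuming recursion (simpler decomposition, same O(n) cost).

-- ===== PORT A =====
-- the inner `while index+counter+1 <= len(sub_clusters)-1 and sub_clstr == sub_clusters[index+counter+1]: counter += 1`
def whileCountA (toks : List String) (tok : String) (index counter : Nat) : Nat :=
  if index + counter + 1 ≤ toks.length - 1 ∧ toks.getD (index + counter + 1) "" = tok then
    whileCountA toks tok index (counter + 1)
  else counter
termination_by toks.length - counter
decreasing_by omega

-- the `for index, sub_clstr in enumerate(sub_clusters)` loop, carrying index, previous_sub_clstr, new_name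
def loopA (toks : List String) : List String → Nat → Option String → List String → List String
  | [], _, _, new_name => new_name
  | sub_clstr :: rest, index, previous, new_name =>
    if some sub_clstr = previous then
      loopA toks rest (index + 1) previous new_name
    else
      let counter := whileCountA toks sub_clstr index 0
      let new_name' := if counter > 0 then
          new_name ++ [sub_clstr ++ "x" ++ PySem.Int.toStr ((counter : Int) + 1)]
        else new_name ++ [sub_clstr]
      loopA toks rest (index + 1) (some sub_clstr) new_name'

def shorten_cluster_names (cluster : String) : String :=
  let sub_clusters := (PySem.Str.split? cluster ".").getD []
  PySem.Str.join "." (loopA sub_clusters sub_clusters 0 none [])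

-- ===== PORT B =====
-- `while k < len(parts) and parts[k] == tok: k += 1` counts the leading run in parts[1:] (k = count+1)
def leadCountB (tok : String) : List String → Nat
  | [] => 0
  | x :: xs => if x = tok then leadCountB tok xs + 1 else 0

def rleB : List String → List String
  | [] => []
  | tok :: rest =>
    let k := leadCountB tok rest + 1
    let head := if k = 1 then tok else tok ++ "x" ++ PySem.Int.toStr (k : Int)
    head :: rleB (rest.drop (k - 1))
termination_by parts => parts.length
decreasing_by simp

def shorten_cluster_names_alt (cluster : String) : String :=
  PySem.Str.join "." (rleB ((PySem.Str.split? cluster ".").getD []))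

-- ===== PRECONDITION & SPEC =====
def Spec_shorten_cluster_names (cluster : String) (out : String) : Prop := out = shorten_cluster_names_alt cluster
instance (cluster : String) (out : String) : Decidable (Spec_shorten_cluster_names cluster out) := by unfold Spec_shorten_cluster_names; infer_instance

-- ===== CLAIM (what is proved, stated in full; the proofs are below) =====
def Claim_equal_shorten_cluster_names : Prop := ∀ (cluster : String), Dom_shorten_cluster_names cluster → Spec_shorten_cluster_names cluster (shorten_cluster_names cluster)

-- ===== LEMMAS AND PROOFS =====

theorem rleB_nil : rleB [] = [] := by rw [rleB]

theorem rleB_cons (tok : String) (rest : List String) :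
    rleB (tok :: rest) =
      (if leadCountB tok rest + 1 = 1 then tok
       else tok ++ "x" ++ PySem.Int.toStr ((leadCountB tok rest + 1 : Nat) : Int))
      :: rleB (rest.drop (leadCountB tok rest + 1 - 1)) := by
  rw [rleB]

theorem whileCountA_eq (toks : List String) (tok : String) (index counter : Nat) :
    whileCountA toks tok index counter = counter + leadCountB tok (toks.drop (index + counter + 1)) := by
  fun_induction whileCountA toks tok index counter with
  | case1 c hg ih =>
    obtain ⟨hb, he⟩ := hg
    have hlt : index + c + 1 < toks.length := by omega
    have hget : toks.getD (index + c + 1) "" = toks[index + c + 1] := List.getD_eq_getElem _ _ hlt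
    rw [hget] at he
    have ihe : whileCountA toks tok index (c + 1) = (c + 1) + leadCountB tok (toks.drop (index + c + 2)) := by
      rw [ih, show index + (c + 1) + 1 = index + c + 2 from by omega]
    rw [ihe, List.drop_eq_getElem_cons hlt]
    simp [leadCountB, he]
    rw [show index + c + 1 + 1 = index + c + 2 by omega]
    omega
  | case2 c hg =>
    rw [not_and_or] at hg
    rcases hg with hb | he
    · have : toks.length ≤ index + c + 1 := by omega
      simp [List.drop_eq_nil_of_le this, leadCountB]
    · by_cases hlt : index + c + 1 < toks.length
      · have hdrop : toks.drop (index + c + 1) = toks[index + c + 1] :: toks.drop (index + c + 2) := by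
          rw [List.drop_eq_getElem_cons hlt]
        have hget : toks.getD (index + c + 1) "" = toks[index + c + 1] := List.getD_eq_getElem _ _ hlt
        rw [hdrop, leadCountB]
        rw [hget] at he
        simp [he]
      · have : toks.length ≤ index + c + 1 := by omega
        simp [List.drop_eq_nil_of_le this, leadCountB]

theorem leadCountB_drop (tok : String) (xs : List String) :
    xs.drop (leadCountB tok xs) = xs.dropWhile (fun t => t = tok) := by
  induction xs with
  | nil => simp [leadCountB]
  | cons x rest ih =>
    by_cases h : x = tok <;> simp [leadCountB, h, ih]

theorem loopA_eq (toks : List String) (xs : List String) :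
    ∀ (i : Nat) (p : Option String) (acc : List String), toks.drop i = xs →
    loopA toks xs i p acc = acc ++ rleB (xs.dropWhile (fun t => some t = p)) := by
  induction xs with
  | nil => intro i p acc _; simp [loopA, rleB_nil]
  | cons tok rest ih =>
    intro i p acc hdrop
    have hrest : toks.drop (i + 1) = rest := by
      rw [← List.drop_drop]; rw [hdrop]; simp
    rw [loopA]
    by_cases hp : some tok = p
    · rw [if_pos hp]
      rw [ih (i + 1) p acc hrest]
      rw [List.dropWhile_cons_of_pos (by simp [hp])]
    · simp only [if_neg hp]
      have hcnt : whileCountA toks tok i 0 = leadCountB tok rest := by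
        rw [whileCountA_eq]; simp [hrest]
      rw [List.dropWhile_cons_of_neg (by simp [hp])]
      rw [rleB_cons]
      set c := leadCountB tok rest with hc
      have hdw : rest.drop c = rest.dropWhile (fun t => t = tok) := leadCountB_drop tok rest
      have hdw2 : rest.dropWhile (fun t => t = tok)
          = rest.dropWhile (fun t => some t = some tok) := by
        congr 1; funext t; simp
      rw [ih (i + 1) (some tok) _ hrest]
      simp only [hcnt]
      by_cases hz : c = 0
      · simp [hz, ← hdw]
      · have h1 : ¬ (c + 1 = 1) := by omega
        have h0 : 0 < c := by omega
        simp only [if_pos h0, h1, ← hdw2, ← hdw]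
        simp

-- ===== VERDICT (by name: the statement is the Claim_ definition above) =====
theorem shorten_cluster_names_spec : Claim_equal_shorten_cluster_names := by
  intro cluster _
  unfold Spec_shorten_cluster_names shorten_cluster_names shorten_cluster_names_alt
  show PySem.Str.join "." (loopA ((PySem.Str.split? cluster ".").getD []) ((PySem.Str.split? cluster ".").getD []) 0 none []) = _
  congr 1
  rw [loopA_eq _ _ 0 none [] (by simp)]
  simp only [List.nil_append]
  congr 1
  induction ((PySem.Str.split? cluster ".").getD []) with
  | nil => rfl
  | cons x xs _ => simp [List.dropWhile]
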